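-- pv_equiv track=rewrite | github.com/10001111/meal-planner-Grocery-list | utils.py | are_same_ingredient
-- ===== SOURCE A (Python) =====
-- def normalize_ingredient_name(name: str) -> str:
--     """
--     Normalize ingredient name for consistency.
--
--     Args:
--         name: Ingredient name
--
--     Returns:
--         Normalized name (lowercase, stripped)
--     """
--     return name.lower().strip()
--
-- def are_same_ingredient(name1: str, name2: str) -> bool:
--     """
--     Check if two ingredient names refer to the same ingredient.
--
--     Args:
--         name1: First ingredient name
--         name2: Second ingredient name
--
--     Returns:
--         True if they're the same ingredient
--     """
--     normalized1 = normalize_ingredient_name(name1)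
--     normalized2 = normalize_ingredient_name(name2)
--
--     # Exact match
--     if normalized1 == normalized2:
--         return True
--
--     # Check for common variations
--     variations = {
--         "onion": ["onions", "yellow onion", "white onion"],
--         "tomato": ["tomatoes"],
--         "bell pepper": ["bell peppers", "red bell pepper", "green bell pepper"],
--         "garlic": ["garlic cloves", "garlic clove"],
--     }
--
--     for base, variants in variations.items():
--         if normalized1 == base and normalized2 in variants:
--             return True
--         if normalized2 == base and normalized1 in variants:
--             return True
--         if normalized1 in variants and normalized2 in variants:
--             return True
--
--     return False
-- ===== SOURCE B (Python) =====
-- VARIATIONS = {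
--     "onion": ["onions", "yellow onion", "white onion"],
--     "tomato": ["tomatoes"],
--     "bell pepper": ["bell peppers", "red bell pepper", "green bell pepper"],
--     "garlic": ["garlic cloves", "garlic clove"],
-- }
--
-- _CANON = {}
-- for _base, _variants in VARIATIONS.items():
--     _CANON[_base] = _base
--     for _v in _variants:
--         _CANON[_v] = _base
--
--
-- def are_same_ingredient(name1: str, name2: str) -> bool:
--     n1 = name1.lower().strip()
--     n2 = name2.lower().strip()
--     return _CANON.get(n1, n1) == _CANON.get(n2, n2)
-- ===== Notes on version B (the rewrite author's own statement) =====
-- stated objective: simpler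
-- what changed: Replaces the per-group loop with its three membership tests by a flat canonicalization dict built once (base and each variant map to the base); the function is then a single comparison of the two canonical forms.
import Mathlib
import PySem

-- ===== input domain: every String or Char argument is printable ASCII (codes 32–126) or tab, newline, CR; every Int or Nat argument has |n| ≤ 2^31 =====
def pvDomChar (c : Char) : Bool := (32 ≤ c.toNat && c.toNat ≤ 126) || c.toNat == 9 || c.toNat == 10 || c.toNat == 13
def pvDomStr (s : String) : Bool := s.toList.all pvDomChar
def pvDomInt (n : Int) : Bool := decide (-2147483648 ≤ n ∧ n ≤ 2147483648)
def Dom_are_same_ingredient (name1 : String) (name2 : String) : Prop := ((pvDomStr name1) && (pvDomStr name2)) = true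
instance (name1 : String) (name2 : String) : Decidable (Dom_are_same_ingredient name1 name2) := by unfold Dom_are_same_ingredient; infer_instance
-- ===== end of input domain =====

-- B replaces A's per-group loop (three membership tests per group) by a flat canonicalization
-- dict built once (each base and each variant maps to its base); the call is then a single
-- comparison of the two canonical forms (objective: simpler).

-- ===== PORT A =====
def normalize_ingredient_name (name : String) : String :=
  PySem.Str.strip (PySem.Str.lower name)

def pvVariations : List (String × List String) :=
  [("onion", ["onions", "yellow onion", "white onion"]),
   ("tomato", ["tomatoes"]),
   ("bell pepper", ["bell peppers", "red bell pepper", "green bell pepper"]),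
   ("garlic", ["garlic cloves", "garlic clove"])]

-- the 'for base, variants in variations.items()' loop with its early returns
def pvCheckVariations (n1 n2 : String) : List (String × List String) → Bool
  | [] => false
  | (base, variants) :: rest =>
    if n1 == base && variants.contains n2 then true
    else if n2 == base && variants.contains n1 then true
    else if variants.contains n1 && variants.contains n2 then true
    else pvCheckVariations n1 n2 rest

def are_same_ingredient (name1 : String) (name2 : String) : Bool :=
  let normalized1 := normalize_ingredient_name name1
  let normalized2 := normalize_ingredient_name name2
  if normalized1 == normalized2 then true
  else pvCheckVariations normalized1 normalized2 pvVariations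

-- ===== PORT B =====
-- the module-level loop building _CANON from VARIATIONS
def pvCanonDict : PySem.Dict String String :=
  pvVariations.foldl
    (fun d p =>
      (p.2.foldl (fun d' v => d'.insert v p.1) (d.insert p.1 p.1)))
    PySem.Dict.empty

def are_same_ingredient_alt (name1 : String) (name2 : String) : Bool :=
  let n1 := PySem.Str.strip (PySem.Str.lower name1)
  let n2 := PySem.Str.strip (PySem.Str.lower name2)
  pvCanonDict.getD n1 n1 == pvCanonDict.getD n2 n2

-- ===== PRECONDITION & SPEC =====
def Spec_are_same_ingredient (name1 : String) (name2 : String) (out : Bool) : Prop := out = are_same_ingredient_alt name1 name2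
instance (name1 : String) (name2 : String) (out : Bool) : Decidable (Spec_are_same_ingredient name1 name2 out) := by unfold Spec_are_same_ingredient; infer_instance

-- ===== CLAIM =====
def Claim_equal_are_same_ingredient : Prop := ∀ (name1 : String) (name2 : String), Dom_are_same_ingredient name1 name2 → Spec_are_same_ingredient name1 name2 (are_same_ingredient name1 name2)

-- ===== LEMMAS AND PROOFS =====
-- all strings occurring anywhere in the variations table (bases and variants)
def pvKeys : List String :=
  ["onion", "onions", "yellow onion", "white onion",
   "tomato", "tomatoes",
   "bell pepper", "bell peppers", "red bell pepper", "green bell pepper",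
   "garlic", "garlic cloves", "garlic clove"]

lemma pvCanonDict_eq : pvCanonDict = PySem.Dict.mk
  [("onion","onion"),("onions","onion"),("yellow onion","onion"),("white onion","onion"),
   ("tomato","tomato"),("tomatoes","tomato"),
   ("bell pepper","bell pepper"),("bell peppers","bell pepper"),("red bell pepper","bell pepper"),("green bell pepper","bell pepper"),
   ("garlic","garlic"),("garlic cloves","garlic"),("garlic clove","garlic")] := by decide

lemma pvGetD_of_not_mem (s : String) (hs : s ∉ pvKeys) :
    pvCanonDict.getD s s = s := by
  simp only [pvKeys, List.mem_cons, List.not_mem_nil, or_false, not_or] at hs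
  obtain ⟨h1,h2,h3,h4,h5,h6,h7,h8,h9,h10,h11,h12,h13⟩ := hs
  rw [pvCanonDict_eq]
  simp [PySem.Dict.getD_eq_get?_getD,
    Ne.symm h1, Ne.symm h2, Ne.symm h3, Ne.symm h4, Ne.symm h5, Ne.symm h6,
    Ne.symm h7, Ne.symm h8, Ne.symm h9, Ne.symm h10, Ne.symm h11, Ne.symm h12, Ne.symm h13,
    PySem.Dict.get?]

lemma pvCheck_of_not_mem_left (s t : String) (hs : s ∉ pvKeys) :
    pvCheckVariations s t pvVariations = false := by
  simp only [pvKeys, List.mem_cons, List.not_mem_nil, or_false, not_or] at hs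
  obtain ⟨h1,h2,h3,h4,h5,h6,h7,h8,h9,h10,h11,h12,h13⟩ := hs
  simp only [pvVariations, pvCheckVariations, List.contains_cons, List.contains_nil]
  simp [h1,h2,h3,h4,h5,h6,h7,h8,h9,h10,h11,h12,h13]

lemma pvCheck_of_not_mem_right (s t : String) (ht : t ∉ pvKeys) :
    pvCheckVariations s t pvVariations = false := by
  simp only [pvKeys, List.mem_cons, List.not_mem_nil, or_false, not_or] at ht
  obtain ⟨h1,h2,h3,h4,h5,h6,h7,h8,h9,h10,h11,h12,h13⟩ := ht
  simp only [pvVariations, pvCheckVariations, List.contains_cons, List.contains_nil]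
  simp [h1,h2,h3,h4,h5,h6,h7,h8,h9,h10,h11,h12,h13]

lemma pvGetD_mem_keys (s : String) (hs : s ∈ pvKeys) :
    pvCanonDict.getD s s ∈ pvKeys := by
  fin_cases hs <;> decide

lemma pvCore (s t : String) :
    (if s == t then true else pvCheckVariations s t pvVariations)
      = (pvCanonDict.getD s s == pvCanonDict.getD t t) := by
  by_cases hs : s ∈ pvKeys <;> by_cases ht : t ∈ pvKeys
  · fin_cases hs <;> fin_cases ht <;> decide
  · have hne : pvCanonDict.getD s s ≠ t := fun h => ht (h ▸ pvGetD_mem_keys s hs)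
    have hst : s ≠ t := fun h => ht (h ▸ hs)
    rw [pvCheck_of_not_mem_right s t ht, pvGetD_of_not_mem t ht]
    simp [hst, hne]
  · have hne : s ≠ pvCanonDict.getD t t := fun h => hs (h ▸ pvGetD_mem_keys t ht)
    have hst : s ≠ t := fun h => hs (h ▸ ht)
    rw [pvCheck_of_not_mem_left s t hs, pvGetD_of_not_mem s hs]
    simp [hst, hne]
  · rw [pvGetD_of_not_mem s hs, pvGetD_of_not_mem t ht,
      pvCheck_of_not_mem_left s t hs]
    by_cases h : s = t <;> simp [h]

-- ===== VERDICT =====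
theorem are_same_ingredient_spec : Claim_equal_are_same_ingredient := by
  intro name1 name2 _
  unfold Spec_are_same_ingredient are_same_ingredient are_same_ingredient_alt normalize_ingredient_name
  exact pvCore _ _
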